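-- pv_equiv track=rewrite | github.com/Josef-Pan/general_purpose_image_crawler | image_crawl.py | keep_only_unique_urls
-- ===== SOURCE A (Python) =====
-- from collections import defaultdict, namedtuple
--
-- def keep_only_unique_urls(visited_urls: list[str]) -> list[str]:
--     """
--     Remove the first level path from URLs that end with 'html', 'htm', or 'shtml'.
--     URLs that have the same first level path are considered categories, not webpages.
--     :param visited_urls: List of visited URLs
--     :return: List of URLs not categories, but ony webpages
--     """
--     if not visited_urls:
--         return visited_urls
--     visited_urls = list(visited_urls)
--     http_or_https = visited_urls[0].split('//')[0] + '//'
--     index_html_urls = [f"index{i}.html" for i in range(1, 10)]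
--     index_html_urls += [f"index{i}.htm" for i in range(1, 10)]
--     index_html_urls += [f"index{i}.shtml" for i in range(1, 10)]
--     index_html_urls += [f"index{i}.php" for i in range(1, 10)]
--     urls_with_html = [url for url in visited_urls if url.endswith(('html', 'htm', 'shtml', 'php')) and
--                       not any([url.endswith(k) for k in index_html_urls])]
--     urls_no_html = [url.rstrip('/') + '/' for url in visited_urls if not url.endswith(('html', 'htm', 'shtml'))]
--     url_counts = defaultdict(int)
--     for url in urls_no_html:
--         fields = url.rstrip('/').replace(http_or_https, "").split('/')
--         for pos in range(1, len(fields)):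
--             sub_fields = fields[:pos + 1]
--             key = http_or_https + "/".join(sub_fields) + '/'
--             url_counts[key] += 1
--     web_pages = [k for k, v in url_counts.items() if v == 1 and k in urls_no_html]
--     return sorted(web_pages + urls_with_html, key=len)
-- ===== SOURCE B (Python) =====
-- def keep_only_unique_urls(visited_urls: list[str]) -> list[str]:
--     """Per-candidate field-prefix test: instead of globally counting every prefix
--     key in a dict, each candidate prefix is kept iff no OTHER URL's field list
--     extends it (pairwise prefix comparison on field lists)."""
--     if not visited_urls:
--         return visited_urls
--     http = visited_urls[0].split('//')[0] + '//'
--     exts = ('html', 'htm', 'shtml', 'php')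
--     index_pages = [f"index{i}.{e}" for e in exts for i in range(1, 10)]
--     urls_with_html = [u for u in visited_urls
--                       if u.endswith(exts) and not any(u.endswith(k) for k in index_pages)]
--     urls_no_html = [u.rstrip('/') + '/' for u in visited_urls
--                     if not u.endswith(('html', 'htm', 'shtml'))]
--     fields_list = [u.rstrip('/').replace(http, '').split('/') for u in urls_no_html]
--     web_pages = [http + '/'.join(f[:pos + 1]) + '/'
--                  for i, f in enumerate(fields_list)
--                  for pos in range(1, len(f))
--                  if not any(j != i and len(g) > pos and g[:pos + 1] == f[:pos + 1]
--                             for j, g in enumerate(fields_list))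
--                  and http + '/'.join(f[:pos + 1]) + '/' in urls_no_html]
--     return sorted(web_pages + urls_with_html, key=len)
-- ===== Notes on version B (the rewrite author's own statement) =====
-- stated objective: alternative
-- what changed: Drops A's global defaultdict that counts every prefix key of every URL (plus its items()-filter): B instead splits each normalized URL into a field list once and tests each candidate prefix directly, keeping it iff no OTHER URL's field list extends that prefix (pairwise field-prefix comparison) and it is itself a visited page; no counter or dict is built at all.
import Mathlib
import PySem

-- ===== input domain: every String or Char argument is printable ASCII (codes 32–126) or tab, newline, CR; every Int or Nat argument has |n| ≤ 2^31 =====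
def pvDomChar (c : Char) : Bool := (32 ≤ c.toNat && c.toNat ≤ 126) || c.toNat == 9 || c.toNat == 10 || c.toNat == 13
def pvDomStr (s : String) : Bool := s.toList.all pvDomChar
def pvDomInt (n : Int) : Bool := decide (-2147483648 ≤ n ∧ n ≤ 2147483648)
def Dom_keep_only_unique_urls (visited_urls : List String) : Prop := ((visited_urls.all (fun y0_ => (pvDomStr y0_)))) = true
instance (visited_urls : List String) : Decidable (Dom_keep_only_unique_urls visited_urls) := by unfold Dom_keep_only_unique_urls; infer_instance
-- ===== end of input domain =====

-- B replaces A's global defaultdict that counts every prefix key of every URL by a direct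
-- per-candidate test: a candidate prefix survives iff no OTHER URL's field list extends it
-- (pairwise field-prefix comparison; objective: an alternative algorithm, no counting structure).

-- Shared string-level helpers (both Pythons contain these exact expressions):
-- hand port of s.rstrip('/'): drop trailing '/' characters (exact; PySem has no rstrip-with-chars)
def pvRstripSlash (s : String) : String := String.ofList ((s.toList.reverse.dropWhile (fun c => c == '/')).reverse)
-- url.endswith(('html', 'htm', 'shtml'))
def pvEndsHtml (u : String) : Bool := PySem.Str.endswith u "html" || PySem.Str.endswith u "htm" || PySem.Str.endswith u "shtml"
-- url.endswith(('html', 'htm', 'shtml', 'php'))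
def pvEndsExt (u : String) : Bool := PySem.Str.endswith u "html" || PySem.Str.endswith u "htm" || PySem.Str.endswith u "shtml" || PySem.Str.endswith u "php"
-- url.rstrip('/').replace(http_or_https, "").split('/')
def pvFieldsOf (http u : String) : List String := (PySem.Str.split? (PySem.Str.replace (pvRstripSlash u) http "") "/").getD []
-- http_or_https + "/".join(fields[:pos + 1]) + '/'
def pvKeyOf (http : String) (fields : List String) (pos : Int) : String := http ++ PySem.Str.join "/" (PySem.List.slice fields none (some (pos + 1))) ++ "/"

-- ===== PORT A =====
-- A's index_html_urls: four range(1,10) comprehensions concatenated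
def pvIndexUrlsA : List String :=
  ((PySem.List.pyRange 1 10 1).map (fun i => "index" ++ PySem.Int.toStr i ++ ".html")) ++
  ((PySem.List.pyRange 1 10 1).map (fun i => "index" ++ PySem.Int.toStr i ++ ".htm")) ++
  ((PySem.List.pyRange 1 10 1).map (fun i => "index" ++ PySem.Int.toStr i ++ ".shtml")) ++
  ((PySem.List.pyRange 1 10 1).map (fun i => "index" ++ PySem.Int.toStr i ++ ".php"))

def keep_only_unique_urls (visited_urls : List String) : List String :=
  if visited_urls.isEmpty then visited_urls else
  let http_or_https := ((PySem.Str.split? (visited_urls.headD "") "//").getD []).headD "" ++ "//"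
  let index_html_urls := pvIndexUrlsA
  let urls_with_html := visited_urls.filter (fun url =>
      pvEndsExt url && !(index_html_urls.any (fun k => PySem.Str.endswith url k)))
  let urls_no_html := (visited_urls.filter (fun url => !pvEndsHtml url)).map (fun url => pvRstripSlash url ++ "/")
  let url_counts := urls_no_html.foldl (fun d url =>
      let fields := pvFieldsOf http_or_https url
      (PySem.List.pyRange 1 (PySem.List.len fields) 1).foldl (fun d pos =>
        let key := pvKeyOf http_or_https fields pos
        d.insert key (d.getD key 0 + 1)) d) (PySem.Dict.empty : PySem.Dict String Int)
  let web_pages := (url_counts.items.filter (fun kv => kv.2 == 1 && urls_no_html.contains kv.1)).map (fun kv => kv.1)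
  PySem.List.sorted (web_pages ++ urls_with_html) (fun s => PySem.Str.len s)

-- ===== PORT B =====
-- B's index_pages: [f"index{i}.{e}" for e in exts for i in range(1, 10)]
def pvIndexUrlsB : List String :=
  ["html", "htm", "shtml", "php"].flatMap (fun ext =>
    (PySem.List.pyRange 1 10 1).map (fun i => "index" ++ PySem.Int.toStr i ++ "." ++ ext))

def keep_only_unique_urls_alt (visited_urls : List String) : List String :=
  if visited_urls.isEmpty then visited_urls else
  let http := ((PySem.Str.split? (visited_urls.headD "") "//").getD []).headD "" ++ "//"
  let index_pages := pvIndexUrlsB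
  let urls_with_html := visited_urls.filter (fun u =>
      pvEndsExt u && !(index_pages.any (fun k => PySem.Str.endswith u k)))
  let urls_no_html := (visited_urls.filter (fun u => !pvEndsHtml u)).map (fun u => pvRstripSlash u ++ "/")
  let fields_list := urls_no_html.map (fun u => pvFieldsOf http u)
  let web_pages := (PySem.List.enumerate fields_list 0).flatMap (fun pf =>
      ((PySem.List.pyRange 1 (PySem.List.len pf.2) 1).filter (fun pos =>
          !((PySem.List.enumerate fields_list 0).any (fun qg =>
              qg.1 != pf.1 && pos < PySem.List.len qg.2 &&
              PySem.List.slice qg.2 none (some (pos + 1)) == PySem.List.slice pf.2 none (some (pos + 1)))) &&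
          urls_no_html.contains (pvKeyOf http pf.2 pos))).map (fun pos => pvKeyOf http pf.2 pos))
  PySem.List.sorted (web_pages ++ urls_with_html) (fun s => PySem.Str.len s)

-- ===== PRECONDITION & SPEC =====
def Spec_keep_only_unique_urls (visited_urls : List String) (out : List String) : Prop := out = keep_only_unique_urls_alt visited_urls
instance (visited_urls : List String) (out : List String) : Decidable (Spec_keep_only_unique_urls visited_urls out) := by unfold Spec_keep_only_unique_urls; infer_instance

-- ===== CLAIM (what is proved, stated in full; the proofs are below) =====
def Claim_equal_keep_only_unique_urls : Prop := ∀ (visited_urls : List String), Dom_keep_only_unique_urls visited_urls → Spec_keep_only_unique_urls visited_urls (keep_only_unique_urls visited_urls)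

-- ===== LEMMAS AND PROOFS =====

-- the two ways of building the 36 index-page names give the same list
theorem pvIndexUrls_eq : pvIndexUrlsB = pvIndexUrlsA := by decide

-- abbreviations used only by the proofs
def pvInner (http : String) (g : List String) : List String :=
  (PySem.List.pyRange 1 (PySem.List.len g) 1).map (fun pos => pvKeyOf http g pos)
def pvL (http : String) (urls : List String) : List String :=
  (urls.map (fun u => pvFieldsOf http u)).flatMap (fun g => pvInner http g)
def pvPred (pos : Int) (g h : List String) : Bool :=
  decide (pos < PySem.List.len h) && (PySem.List.slice h none (some (pos + 1)) == PySem.List.slice g none (some (pos + 1)))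
def pvSlashFree (g : List String) : Prop := ∀ x ∈ g, '/' ∉ x.toList

-- filtering the deduplicated list equals filtering the raw list when every retained
-- element occurs at most once
theorem pvFilterOfList (L : List String) (Q : String → Bool)
    (h : ∀ k, Q k = true → L.count k ≤ 1) :
    (PySem.Set.ofList L).filter Q = L.filter Q := by
  induction L using List.reverseRecOn with
  | nil => rfl
  | append_singleton L x ih =>
    have hcount : ∀ k, Q k = true → List.count k L ≤ 1 := by
      intro k hk
      have := h k hk
      rw [List.count_append] at this
      omega
    rw [PySem.Set.ofList_append_singleton, List.filter_append]
    by_cases hm : x ∈ PySem.Set.ofList L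
    · have hxL : x ∈ L := (PySem.Set.mem_ofList L x).1 hm
      have hq : Q x = false := by
        cases hqx : Q x with
        | false => rfl
        | true =>
          have h1 := h x hqx
          have h2 := List.count_pos_iff.2 hxL
          have h3 : List.count x [x] = 1 := by simp
          rw [List.count_append] at h1
          omega
      have hnil : List.filter Q [x] = [] := by simp [hq]
      rw [PySem.Set.add_of_mem hm, ih hcount, hnil, List.append_nil]
    · rw [PySem.Set.add_of_not_mem hm, List.filter_append, ih hcount]

-- ---- elements of a '/'-split contain no '/' ----
theorem pvGoSlashFree (fuel : Nat) : ∀ (l cur : List Char) (acc : List (List Char)),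
    l.length < fuel → '/' ∉ cur → (∀ p ∈ acc, '/' ∉ p) →
    ∀ p ∈ PySem.Chars.splitOn.go ['/'] fuel l cur acc, '/' ∉ p := by
  induction fuel with
  | zero => intro l cur acc h; omega
  | succ fuel ih =>
    intro l cur acc hlen hcur hacc p hp
    match l with
    | [] =>
      simp only [PySem.Chars.splitOn.go] at hp
      rw [List.mem_reverse, List.mem_cons] at hp
      rcases hp with h | h
      · subst h; rw [List.mem_reverse]; exact hcur
      · exact hacc p h
    | c :: rest =>
      simp only [PySem.Chars.splitOn.go] at hp
      split at hp
      · refine ih _ [] (cur.reverse :: acc) ?_ (by simp) ?_ p hp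
        · simp only [List.length_cons] at hlen
          simp only [List.length_drop, List.length_cons]
          omega
        · intro q hq
          rw [List.mem_cons] at hq
          rcases hq with h | h
          · subst h; rw [List.mem_reverse]; exact hcur
          · exact hacc q h
      · rename_i hpre
        have hc : c ≠ '/' := by
          intro h
          subst h
          simp [List.isPrefixOf] at hpre
        refine ih rest (c :: cur) acc ?_ ?_ hacc p hp
        · simp only [List.length_cons] at hlen; omega
        · intro h
          rw [List.mem_cons] at h
          rcases h with h | h
          · exact hc h.symm
          · exact hcur h

theorem pvSplitSlashFree (s : List Char) : ∀ p ∈ PySem.Chars.splitOn s ['/'], '/' ∉ p := by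
  intro p hp
  unfold PySem.Chars.splitOn at hp
  exact pvGoSlashFree (s.length + 1) s [] [] (by omega) (by simp) (by simp) p hp

theorem pvFieldsSlashFree (http u : String) : pvSlashFree (pvFieldsOf http u) := by
  intro x hx
  unfold pvFieldsOf at hx
  have h := PySem.Str.split?_map (PySem.Str.replace (pvRstripSlash u) http "") "/"
  cases hsp : PySem.Str.split? (PySem.Str.replace (pvRstripSlash u) http "") "/" with
  | none => rw [hsp] at hx; simp at hx
  | some parts =>
    rw [hsp] at h hx
    simp only [Option.map_some] at h
    have hsep : ("/" : String).toList = ['/'] := by decide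
    rw [PySem.Chars.split?, hsep] at h
    simp only [List.isEmpty_cons, if_false, Bool.false_eq_true] at h
    have h2 : parts.map String.toList = PySem.Chars.splitOn (PySem.Str.replace (pvRstripSlash u) http "").toList ['/'] := by
      exact Option.some_injective _ h
    simp only [Option.getD_some] at hx
    have hx2 : x.toList ∈ parts.map String.toList := List.mem_map_of_mem hx
    rw [h2] at hx2
    exact pvSplitSlashFree _ _ hx2

-- ---- key injectivity ----
-- "/".join is injective on nonempty lists of '/'-free strings
theorem pvJoinInj (P R : List String) (hP : ∀ x ∈ P, '/' ∉ x.toList) (hR : ∀ x ∈ R, '/' ∉ x.toList)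
    (hPne : P ≠ []) (hRne : R ≠ []) (h : PySem.Str.join "/" P = PySem.Str.join "/" R) : P = R := by
  have h' := congrArg String.toList h
  rw [PySem.Str.toList_join, PySem.Str.toList_join] at h'
  have hsep : ("/" : String).toList = ['/'] := by decide
  rw [hsep] at h'
  simp only [PySem.Chars.join] at h'
  have hP' := List.splitOn_intercalate (P.map String.toList) '/'
      (by intro l hl; obtain ⟨x, hx, rfl⟩ := List.mem_map.1 hl; exact hP x hx)
      (by simpa using hPne)
  have hR' := List.splitOn_intercalate (R.map String.toList) '/'
      (by intro l hl; obtain ⟨x, hx, rfl⟩ := List.mem_map.1 hl; exact hR x hx)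
      (by simpa using hRne)
  have hm : P.map String.toList = R.map String.toList := by
    rw [← hP', ← hR', h']
  exact (List.map_injective_iff.2 (fun a b hab => String.toList_inj.mp hab)) hm

-- two keys agree iff the positions and the field prefixes agree
set_option maxHeartbeats 1600000 in
theorem pvKeyEqIff (http : String) (g h : List String) (pos q : Int)
    (hg : pvSlashFree g) (hh : pvSlashFree h)
    (h1 : 1 ≤ pos) (h2 : pos < PySem.List.len g) (h3 : 1 ≤ q) (h4 : q < PySem.List.len h) :
    pvKeyOf http h q = pvKeyOf http g pos ↔
      (q = pos ∧ PySem.List.slice h none (some (pos + 1)) = PySem.List.slice g none (some (pos + 1))) := by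
  have hlg : (pos : Int) < (g.length : Int) := by simpa [PySem.List.len] using h2
  have hlh : (q : Int) < (h.length : Int) := by simpa [PySem.List.len] using h4
  have hsliceh : PySem.List.slice h none (some (q + 1)) = h.take (q + 1).toNat :=
    PySem.List.slice_to h (by omega)
  have hsliceg : PySem.List.slice g none (some (pos + 1)) = g.take (pos + 1).toNat :=
    PySem.List.slice_to g (by omega)
  constructor
  · intro heq
    have h' := congrArg String.toList heq
    unfold pvKeyOf at h'
    rw [String.toList_append, String.toList_append, String.toList_append, String.toList_append] at h'
    have hj : (PySem.Str.join "/" (PySem.List.slice h none (some (q + 1)))).toList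
        = (PySem.Str.join "/" (PySem.List.slice g none (some (pos + 1)))).toList := by
      rw [List.append_assoc, List.append_assoc] at h'
      have := List.append_cancel_left h'
      exact List.append_cancel_right this
    have hjoin : PySem.Str.join "/" (PySem.List.slice h none (some (q + 1)))
        = PySem.Str.join "/" (PySem.List.slice g none (some (pos + 1))) := String.toList_inj.mp hj
    have hslices : PySem.List.slice h none (some (q + 1)) = PySem.List.slice g none (some (pos + 1)) := by
      refine pvJoinInj _ _ ?_ ?_ ?_ ?_ hjoin
      · intro x hx
        rw [hsliceh] at hx
        exact hh x (List.mem_of_mem_take hx)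
      · intro x hx
        rw [hsliceg] at hx
        exact hg x (List.mem_of_mem_take hx)
      · rw [hsliceh]
        intro hnil
        have := congrArg List.length hnil
        simp only [List.length_take, List.length_nil] at this
        omega
      · rw [hsliceg]
        intro hnil
        have := congrArg List.length hnil
        simp only [List.length_take, List.length_nil] at this
        omega
    have hlen := congrArg List.length hslices
    rw [hsliceh, hsliceg] at hlen
    simp only [List.length_take] at hlen
    have hq : q = pos := by omega
    subst hq
    exact ⟨rfl, hslices⟩
  · rintro ⟨rfl, hs⟩
    unfold pvKeyOf
    rw [hs]

-- ---- counting ----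
-- how many keys of one URL's field list equal the candidate key
theorem pvInnerCount (http : String) (g h : List String) (pos : Int)
    (hg : pvSlashFree g) (hh : pvSlashFree h) (h1 : 1 ≤ pos) (h2 : pos < PySem.List.len g) :
    (pvInner http h).count (pvKeyOf http g pos) = if pvPred pos g h then 1 else 0 := by
  unfold pvInner
  rw [List.count, List.countP_map]
  by_cases hc : pvPred pos g h = true
  · rw [if_pos hc]
    unfold pvPred at hc
    rw [Bool.and_eq_true, decide_eq_true_eq, beq_iff_eq] at hc
    obtain ⟨hlt, hsl⟩ := hc
    have hcg : List.countP ((fun x => x == pvKeyOf http g pos) ∘ fun pos_1 => pvKeyOf http h pos_1)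
        (PySem.List.pyRange 1 (PySem.List.len h) 1)
        = List.countP (fun x => x == pos) (PySem.List.pyRange 1 (PySem.List.len h) 1) := by
      apply List.countP_congr
      intro x hx
      obtain ⟨hx1, hx2⟩ := PySem.List.mem_pyRange_one.1 hx
      simp only [Function.comp_apply, beq_iff_eq]
      rw [pvKeyEqIff http g h pos x hg hh h1 h2 hx1 hx2]
      constructor
      · rintro ⟨rfl, _⟩; rfl
      · rintro rfl; exact ⟨rfl, hsl⟩
    rw [hcg, ← List.count]
    exact List.count_eq_one_of_mem (PySem.List.nodup_pyRange_one 1 (PySem.List.len h))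
      (PySem.List.mem_pyRange_one.2 ⟨h1, hlt⟩)
  · rw [if_neg hc]
    rw [List.countP_eq_zero]
    intro x hx hbeq
    obtain ⟨hx1, hx2⟩ := PySem.List.mem_pyRange_one.1 hx
    simp only [Function.comp_apply, beq_iff_eq] at hbeq
    obtain ⟨rfl, hsl⟩ := (pvKeyEqIff http g h pos x hg hh h1 h2 hx1 hx2).1 hbeq
    apply hc
    unfold pvPred
    rw [Bool.and_eq_true, decide_eq_true_eq, beq_iff_eq]
    exact ⟨hx2, hsl⟩

theorem pvSumIte (l : List (List String)) (p : List String → Bool) :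
    (l.map (fun x => if p x then 1 else 0)).sum = l.countP p := by
  induction l with
  | nil => rfl
  | cons x l ih =>
    rw [List.map_cons, List.sum_cons, List.countP_cons, ih]
    by_cases hx : p x = true
    · simp [hx]
      omega
    · simp [hx]

-- total count of the candidate key = number of field lists extending the prefix
set_option maxHeartbeats 4000000 in
theorem pvCountKey (http : String) (urls : List String) (g : List String) (pos : Int)
    (hg : pvSlashFree g) (h1 : 1 ≤ pos) (h2 : pos < PySem.List.len g) :
    (pvL http urls).count (pvKeyOf http g pos) =
      (urls.map (fun u => pvFieldsOf http u)).countP (pvPred pos g) := by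
  unfold pvL
  rw [List.count_flatMap, ← pvSumIte]
  refine congrArg List.sum (List.map_congr_left ?_)
  intro h hmem
  obtain ⟨u, -, rfl⟩ := List.mem_map.1 hmem
  simp only [Function.comp_apply]
  exact pvInnerCount http g (pvFieldsOf http u) pos hg (pvFieldsSlashFree http u) h1 h2

-- countP over an enumerated list: indices below the start never match
theorem pvEnumCountZero (xs : List (List String)) (s t : Int) (p : List String → Bool) (ht : t < s) :
    (PySem.List.enumerate xs s).countP (fun qg => qg.1 == t && p qg.2) = 0 := by
  rw [List.countP_eq_zero]
  intro qg hqg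
  obtain ⟨k, hk, rfl⟩ := (PySem.List.mem_enumerate_iff xs s qg).1 hqg
  simp only [Bool.and_eq_true, beq_iff_eq]
  rintro ⟨h, -⟩
  omega

-- countP over an enumerated list, split at one index
theorem pvCountIdx (xs : List (List String)) (s : Int) (k : Nat) (hk : k < xs.length) (p : List String → Bool) :
    (PySem.List.enumerate xs s).countP (fun qg => qg.1 == s + (k : Int) && p qg.2) = if p xs[k] then 1 else 0 := by
  induction xs generalizing s k with
  | nil => simp at hk
  | cons x xs ih =>
    rw [PySem.List.enumerate_cons, List.countP_cons]
    cases k with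
    | zero =>
      have hz : (PySem.List.enumerate xs (s + 1)).countP (fun qg => qg.1 == s + ((0 : Nat) : Int) && p qg.2) = 0 :=
        pvEnumCountZero xs (s + 1) (s + ((0 : Nat) : Int)) p (by omega)
      rw [hz]
      simp only [Nat.cast_zero, add_zero, beq_self_eq_true, Bool.true_and, List.getElem_cons_zero]
      by_cases hx : p x = true <;> simp [hx]
    | succ k =>
      have hcast : s + ((k + 1 : Nat) : Int) = (s + 1) + (k : Int) := by push_cast; ring
      have hne : (s == s + ((k + 1 : Nat) : Int)) = false := by
        rw [beq_eq_false_iff_ne]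
        intro habs
        omega
      rw [hne, Bool.false_and, if_neg (by simp), add_zero]
      have hk' : k < xs.length := by simpa using hk
      have := ih (s + 1) k hk'
      rw [List.getElem_cons_succ]
      rw [← this]
      apply List.countP_congr
      intro qg _
      rw [hcast]

theorem pvCountPSplit (l : List (Int × List String)) (a : Int → Bool) (p : List String → Bool) :
    l.countP (fun qg => p qg.2) =
      l.countP (fun qg => a qg.1 && p qg.2) + l.countP (fun qg => !(a qg.1) && p qg.2) := by
  induction l with
  | nil => rfl
  | cons x l ih =>
    rw [List.countP_cons, List.countP_cons, List.countP_cons, ih]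
    by_cases ha : a x.1 = true <;> by_cases hp : p x.2 = true <;> simp [ha, hp] <;> omega

-- count == 1 iff no OTHER index satisfies the prefix-extension predicate
theorem pvCountOneIff (fl : List (List String)) (k : Nat) (hk : k < fl.length) (pos : Int)
    (hpred : pvPred pos fl[k] fl[k] = true) :
    (fl.countP (pvPred pos fl[k]) == 1) =
      !((PySem.List.enumerate fl 0).any (fun qg => qg.1 != (k : Int) && pvPred pos fl[k] qg.2)) := by
  have h0 : (PySem.List.enumerate fl 0).countP (fun qg => pvPred pos fl[k] qg.2) = fl.countP (pvPred pos fl[k]) := by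
    have hm := List.countP_map (p := pvPred pos fl[k]) (f := fun qg : Int × List String => qg.2) (l := PySem.List.enumerate fl 0)
    rw [show ((PySem.List.enumerate fl 0).map fun qg : Int × List String => qg.2) = fl from PySem.List.map_snd_enumerate fl 0] at hm
    exact hm.symm
  have hsplit := pvCountPSplit (PySem.List.enumerate fl 0) (fun i => i == (k : Int)) (pvPred pos fl[k])
  have hidx : (PySem.List.enumerate fl 0).countP (fun qg => qg.1 == (k : Int) && pvPred pos fl[k] qg.2) = 1 := by
    have := pvCountIdx fl 0 k hk (pvPred pos fl[k])
    simp only [zero_add] at this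
    rw [this, if_pos hpred]
  rw [Bool.eq_iff_iff, beq_iff_eq, Bool.not_eq_true', List.any_eq_false]
  rw [← h0, hsplit, hidx]
  constructor
  · intro h qg hqg hcontra
    have hz : (PySem.List.enumerate fl 0).countP (fun qg => !(qg.1 == (k : Int)) && pvPred pos fl[k] qg.2) = 0 := by
      omega
    rw [List.countP_eq_zero] at hz
    exact hz qg hqg (by simpa [bne] using hcontra)
  · intro h
    have hz : (PySem.List.enumerate fl 0).countP (fun qg => !(qg.1 == (k : Int)) && pvPred pos fl[k] qg.2) = 0 := by
      rw [List.countP_eq_zero]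
      intro qg hqg hcontra
      exact h qg hqg (by simpa [bne] using hcontra)
    omega

-- flatMap over an enumeration by second components only
theorem pvFlatMapEnum (l : List (List String)) (s : Int) (F : List String → List String) :
    (PySem.List.enumerate l s).flatMap (fun pf => F pf.2) = l.flatMap F := by
  induction l generalizing s with
  | nil => rfl
  | cons x l ih =>
    rw [PySem.List.enumerate_cons, List.flatMap_cons, List.flatMap_cons, ih]

theorem pvFlatMapCongr (l : List (Int × List String)) (f g : Int × List String → List String)
    (h : ∀ x ∈ l, f x = g x) : l.flatMap f = l.flatMap g := by
  induction l with
  | nil => rfl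
  | cons x l ih =>
    rw [List.flatMap_cons, List.flatMap_cons, h x List.mem_cons_self,
      ih (fun y hy => h y (List.mem_cons_of_mem x hy))]

-- ---- assembling the web-page lists ----
-- A's nested defaultdict loop + items()-filter equals B's per-candidate prefix test
theorem pvWeb_eq (http : String) (urls : List String) :
    ((urls.foldl (fun d url =>
        (PySem.List.pyRange 1 (PySem.List.len (pvFieldsOf http url)) 1).foldl (fun d pos =>
          d.insert (pvKeyOf http (pvFieldsOf http url) pos)
            (d.getD (pvKeyOf http (pvFieldsOf http url) pos) 0 + 1)) d)
      (PySem.Dict.empty : PySem.Dict String Int)).items.filter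
        (fun kv => kv.2 == 1 && urls.contains kv.1)).map (fun kv => kv.1)
    =
    (PySem.List.enumerate (urls.map (fun u => pvFieldsOf http u)) 0).flatMap (fun pf =>
      ((PySem.List.pyRange 1 (PySem.List.len pf.2) 1).filter (fun pos =>
          !((PySem.List.enumerate (urls.map (fun u => pvFieldsOf http u)) 0).any (fun qg =>
              qg.1 != pf.1 && pos < PySem.List.len qg.2 &&
              PySem.List.slice qg.2 none (some (pos + 1)) == PySem.List.slice pf.2 none (some (pos + 1)))) &&
          urls.contains (pvKeyOf http pf.2 pos))).map (fun pos => pvKeyOf http pf.2 pos)) := by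
  have hL : pvL http urls = urls.flatMap (fun u => pvInner http (pvFieldsOf http u)) := by
    unfold pvL
    rw [List.flatMap_map]
  have hfold : urls.foldl (fun d url =>
        (PySem.List.pyRange 1 (PySem.List.len (pvFieldsOf http url)) 1).foldl (fun d pos =>
          d.insert (pvKeyOf http (pvFieldsOf http url) pos)
            (d.getD (pvKeyOf http (pvFieldsOf http url) pos) 0 + 1)) d)
      (PySem.Dict.empty : PySem.Dict String Int) = PySem.Dict.counter (pvL http urls) := by
    rw [← PySem.Dict.foldl_insert_getD_add_one_eq_counter, hL, List.foldl_flatMap]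
    simp only [pvInner, List.foldl_map]
  rw [hfold, PySem.Dict.items_counter]
  rw [List.filter_map, List.map_map]
  simp only [Function.comp_def]
  rw [List.map_id']
  rw [pvFilterOfList (pvL http urls) _ (by
    intro k hk
    simp only [Bool.and_eq_true, beq_iff_eq] at hk
    have h1 : List.count k (pvL http urls) = 1 := by exact_mod_cast hk.1
    omega)]
  conv_lhs => rw [pvL]
  rw [List.filter_flatMap]
  rw [← pvFlatMapEnum (urls.map fun u => pvFieldsOf http u) 0]
  apply pvFlatMapCongr
  intro pf hpf
  obtain ⟨k, hk, rfl⟩ := (PySem.List.mem_enumerate_iff _ 0 pf).1 hpf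
  simp only [zero_add]
  rw [pvInner, List.filter_map]
  congr 1
  apply List.filter_congr
  intro pos hpos
  obtain ⟨hp1, hp2⟩ := PySem.List.mem_pyRange_one.1 hpos
  simp only [Function.comp_apply]
  have hg : pvSlashFree (urls.map (fun u => pvFieldsOf http u))[k] := by
    have hmemk : (urls.map (fun u => pvFieldsOf http u))[k] ∈ urls.map (fun u => pvFieldsOf http u) :=
      List.getElem_mem hk
    obtain ⟨u, _, hu⟩ := List.mem_map.1 hmemk
    rw [← hu]
    exact pvFieldsSlashFree http u
  have hcnt := pvCountKey http urls ((urls.map (fun u => pvFieldsOf http u))[k]) pos hg hp1 hp2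
  have hpredself : pvPred pos (urls.map (fun u => pvFieldsOf http u))[k] (urls.map (fun u => pvFieldsOf http u))[k] = true := by
    unfold pvPred
    rw [Bool.and_eq_true, decide_eq_true_eq]
    exact ⟨hp2, beq_self_eq_true _⟩
  have hone := pvCountOneIff (urls.map (fun u => pvFieldsOf http u)) k hk pos hpredself
  unfold pvL at hcnt
  rw [hcnt]
  have hcast : ((((urls.map (fun u => pvFieldsOf http u)).countP (pvPred pos ((urls.map (fun u => pvFieldsOf http u))[k])) : Nat) : Int) == 1)
      = ((urls.map (fun u => pvFieldsOf http u)).countP (pvPred pos ((urls.map (fun u => pvFieldsOf http u))[k])) == 1) := by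
    rw [Bool.eq_iff_iff]
    simp only [beq_iff_eq]
    omega
  rw [hcast, hone]
  simp only [pvPred, Bool.and_assoc]

-- ===== VERDICT (by name: the statement is the Claim_ definition above) =====
theorem keep_only_unique_urls_spec : Claim_equal_keep_only_unique_urls := by
  intro visited_urls _
  unfold Spec_keep_only_unique_urls keep_only_unique_urls keep_only_unique_urls_alt
  by_cases hv : visited_urls.isEmpty = true
  · rw [if_pos hv, if_pos hv]
  · rw [if_neg hv, if_neg hv]
    simp only [pvIndexUrls_eq]
    congr 1
    congr 1
    exact pvWeb_eq _ _
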